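-- pv_equiv track=rewrite | github.com/cesargodoi/register2event | models/2_defs.py | shortname_reports
-- ===== SOURCE A (Python) =====
-- def shortname_reports(item, max_len=12):
--     if len(item) > max_len and len(item) > 2:
--         item_split = item.split(" ")
--         new_name = [item_split[0]]
--         # abreviar
--         for n in range(len(item_split) - 1):
--             if n < len(item_split) - 2:
--                 if len(item_split[n + 1]) > 3:
--                     abbr = "%s." % item_split[n + 1][0]
--                     new_name.append(abbr)
--                 else:
--                     new_name.append(item_split[n + 1])
--             else:
--                 new_name.append(item_split[n + 1])
--         return " ".join(new_name)
--     else: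
--         return item
-- ===== SOURCE B (Python) =====
-- def shortname_reports(item, max_len=12):
--     if not (len(item) > max_len and len(item) > 2):
--         return item
--     # single forward pass over the characters: a small state machine with a
--     # word buffer; the first completed word is kept, every later completed
--     # word is abbreviated, the trailing (last) word is kept verbatim.
--     out = None  # emitted text so far; None = no word completed yet
--     word = ""
--     for c in item:
--         if c == " ":
--             if out is None:
--                 out = word
--             else:
--                 out += " " + (word[0] + "." if len(word) > 3 else word)
--             word = ""
--         else:
--             word += c
--     if out is None:  # no space at all: single word, nothing to abbreviate
--         return item
--     return out + " " + word
-- ===== Notes on version B (the rewrite author's own statement) =====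
-- stated objective: alternative
-- what changed: Replaces A's split-into-words plus index-checked range loop by a single character-level pass: a state machine with a word buffer and an Optional output accumulator (no split, no slicing, no join), keeping the first completed word, abbreviating later completed words, and appending the trailing word verbatim.
import Mathlib
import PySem

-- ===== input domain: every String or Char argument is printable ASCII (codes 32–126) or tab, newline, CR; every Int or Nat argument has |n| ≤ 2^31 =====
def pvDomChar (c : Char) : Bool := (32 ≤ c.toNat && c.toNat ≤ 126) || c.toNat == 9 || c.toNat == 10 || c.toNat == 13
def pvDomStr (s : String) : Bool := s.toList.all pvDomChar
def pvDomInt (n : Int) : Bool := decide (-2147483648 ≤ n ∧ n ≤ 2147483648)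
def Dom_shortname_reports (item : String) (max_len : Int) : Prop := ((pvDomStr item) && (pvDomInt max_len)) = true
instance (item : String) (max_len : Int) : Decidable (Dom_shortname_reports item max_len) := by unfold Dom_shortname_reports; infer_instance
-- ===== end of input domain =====

-- B replaces A's split + index-checked loop by a single character-level state machine
-- (word buffer + Optional output accumulator); objective: alternative, same cost.


-- ===== PORT A =====
def shortname_reports (item : String) (max_len : Int) : String :=
  if PySem.Str.len item > max_len ∧ PySem.Str.len item > 2 then
    let item_split := PySem.Chars.splitOn item.toList [' ']
    let new_name :=
      (PySem.List.pyRange 0 ((item_split.length : Int) - 1) 1).foldl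
        (fun acc n =>
          if n < (item_split.length : Int) - 2 then
            if (PySem.List.pyGetD item_split (n + 1) []).length > 3 then
              -- abbr = "%s." % item_split[n + 1][0]
              acc ++ [[PySem.List.pyGetD (PySem.List.pyGetD item_split (n + 1) []) 0 ' ', '.']]
            else
              acc ++ [PySem.List.pyGetD item_split (n + 1) []]
          else
            acc ++ [PySem.List.pyGetD item_split (n + 1) []])
        [PySem.List.pyGetD item_split 0 []]
    String.ofList (PySem.Chars.join [' '] new_name)
  else
    item

-- ===== PORT B =====
-- word[0] + "." if len(word) > 3 else word
def pvAbbr (w : List Char) : List Char :=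
  if w.length > 3 then [PySem.List.pyGetD w 0 ' ', '.'] else w

-- one step of Source B's loop body: state = (out : Optional emitted text, word buffer)
def pvStep (st : Option (List Char) × List Char) (c : Char) :
    Option (List Char) × List Char :=
  if c = ' ' then
    match st.1 with
    | none => (some st.2, [])
    | some o => (some (o ++ ' ' :: pvAbbr st.2), [])
  else (st.1, st.2 ++ [c])

def shortname_reports_alt (item : String) (max_len : Int) : String :=
  if ¬(PySem.Str.len item > max_len ∧ PySem.Str.len item > 2) then item
  else
    let st := item.toList.foldl pvStep (none, [])
    match st.1 with
    | none => item
    | some o => String.ofList (o ++ ' ' :: st.2)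

-- ===== PRECONDITION & SPEC =====
def Spec_shortname_reports (item : String) (max_len : Int) (out : String) : Prop := out = shortname_reports_alt item max_len
instance (item : String) (max_len : Int) (out : String) : Decidable (Spec_shortname_reports item max_len out) := by unfold Spec_shortname_reports; infer_instance

-- ===== CLAIM (what is proved, stated in full; the proofs are below) =====
def Claim_equal_shortname_reports : Prop := ∀ (item : String) (max_len : Int), Dom_shortname_reports item max_len → Spec_shortname_reports item max_len (shortname_reports item max_len)

-- ===== LEMMAS AND PROOFS =====

-- splitOn.go only ever prepends to its accumulator
lemma splitOn_go_acc (fuel : Nat) (l cur : List Char) (sep : List Char) (acc : List (List Char)) :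
    PySem.Chars.splitOn.go sep fuel l cur acc =
      acc.reverse ++ PySem.Chars.splitOn.go sep fuel l cur [] := by
  induction fuel using Nat.strong_induction_on generalizing l cur acc with
  | _ fuel ih =>
    match fuel, l with
    | 0, l => simp [PySem.Chars.splitOn.go]
    | (f+1), [] => simp [PySem.Chars.splitOn.go]
    | (f+1), c :: rest =>
      rw [PySem.Chars.splitOn.go, PySem.Chars.splitOn.go]
      by_cases hp : sep.isPrefixOf (c :: rest)
      · simp only [hp, if_true]
        rw [ih f (by omega), ih f (by omega) _ _ [cur.reverse]]
        simp
      · simp only [hp]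
        exact ih f (by omega) _ _ _

lemma splitOn_go_ne_nil (fuel : Nat) (l cur : List Char) (sep : List Char) :
    PySem.Chars.splitOn.go sep fuel l cur [] ≠ [] := by
  induction fuel using Nat.strong_induction_on generalizing l cur with
  | _ fuel ih =>
    match fuel, l with
    | 0, l => simp [PySem.Chars.splitOn.go]
    | (f+1), [] => simp [PySem.Chars.splitOn.go]
    | (f+1), c :: rest =>
      rw [PySem.Chars.splitOn.go]
      by_cases hp : sep.isPrefixOf (c :: rest)
      · simp only [hp, if_true]
        rw [splitOn_go_acc]
        simp
      · simp only [hp]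
        exact ih f (by omega) _ _

lemma join_splitOn_go (sep : List Char) (hsep : sep ≠ []) (fuel : Nat) (l cur : List Char)
    (hf : l.length < fuel) :
    PySem.Chars.join sep (PySem.Chars.splitOn.go sep fuel l cur []) = cur.reverse ++ l := by
  induction fuel using Nat.strong_induction_on generalizing l cur with
  | _ fuel ih =>
    match fuel, l with
    | (f+1), [] =>
      simp [PySem.Chars.splitOn.go, PySem.Chars.join_singleton]
    | (f+1), c :: rest =>
      rw [PySem.Chars.splitOn.go]
      by_cases hp : sep.isPrefixOf (c :: rest)
      · simp only [hp, if_true]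
        rw [splitOn_go_acc]
        simp only [List.reverse_cons, List.reverse_nil, List.nil_append]
        have hne := splitOn_go_ne_nil f (List.drop sep.length (c :: rest)) [] sep
        obtain ⟨q, qs, hq⟩ : ∃ q qs, PySem.Chars.splitOn.go sep f (List.drop sep.length (c :: rest)) [] [] = q :: qs := by
          rcases h : PySem.Chars.splitOn.go sep f (List.drop sep.length (c :: rest)) [] [] with _ | ⟨q, qs⟩
          · exact absurd h hne
          · exact ⟨q, qs, rfl⟩
        rw [hq, List.singleton_append, PySem.Chars.join_cons_cons, ← hq,
          ih f (by omega) _ _ (by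
            have hs1 : 0 < sep.length := List.length_pos_of_ne_nil hsep
            simp at hf ⊢; omega)]
        simp only [List.reverse_nil, List.nil_append, List.append_assoc]
        congr 1
        exact List.prefix_iff_eq_append.mp (List.isPrefixOf_iff_prefix.mp hp) |>.symm ▸ rfl
      · rw [if_neg (by simpa using hp)]
        rw [ih f (by omega) _ _ (by simp at hf ⊢; omega)]
        simp

-- joining the pieces with the separator recovers the string
lemma join_splitOn (s sep : List Char) (hsep : sep ≠ []) :
    PySem.Chars.join sep (PySem.Chars.splitOn s sep) = s := by
  rw [PySem.Chars.splitOn.eq_def]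
  simpa using join_splitOn_go sep hsep (s.length + 1) s [] (by omega)

lemma splitOn_ne_nil (s sep : List Char) : PySem.Chars.splitOn s sep ≠ [] := by
  rw [PySem.Chars.splitOn.eq_def]
  exact splitOn_go_ne_nil _ _ _ _

-- no piece produced by splitOn on a single-char separator contains that char
lemma splitOn_go_sep_free (c0 : Char) (fuel : Nat) (l cur : List Char)
    (acc : List (List Char)) (hf : l.length < fuel) (hcur : c0 ∉ cur)
    (hacc : ∀ a ∈ acc, c0 ∉ a) :
    ∀ x ∈ PySem.Chars.splitOn.go [c0] fuel l cur acc, c0 ∉ x := by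
  induction fuel using Nat.strong_induction_on generalizing l cur acc with
  | _ fuel ih =>
    match fuel, l with
    | (f+1), [] =>
      simp only [PySem.Chars.splitOn.go]
      intro x hx
      simp only [List.mem_reverse, List.mem_cons] at hx
      rcases hx with h | h
      · subst h; simpa using hcur
      · exact hacc x h
    | (f+1), c :: rest =>
      rw [PySem.Chars.splitOn.go]
      by_cases hp : List.isPrefixOf [c0] (c :: rest)
      · simp only [hp, if_true]
        refine ih f (by omega) _ _ _ (by simp at hf ⊢; omega) (by simp) ?_
        intro a ha
        rcases List.mem_cons.mp ha with h | h
        · subst h; simpa using hcur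
        · exact hacc a h
      · simp only [hp]
        refine ih f (by omega) _ _ _ (by simp at hf ⊢; omega) ?_ hacc
        intro hmem
        have hmem' : c0 = c ∨ c0 ∈ cur := by simpa using hmem
        rcases hmem' with h | h
        · exact hp (by simp [List.isPrefixOf, h])
        · exact hcur h

lemma splitOn_sep_free (s : List Char) (c0 : Char) :
    ∀ x ∈ PySem.Chars.splitOn s [c0], c0 ∉ x := by
  rw [PySem.Chars.splitOn.eq_def]
  exact splitOn_go_sep_free c0 (s.length + 1) s [] [] (by omega) (by simp) (by simp)

-- A's loop body equals appending one element chosen by an if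
lemma foldA (ws : List (List Char)) :
    (PySem.List.pyRange 0 ((ws.length : Int) - 1) 1).foldl
        (fun acc n =>
          if n < (ws.length : Int) - 2 then
            if (PySem.List.pyGetD ws (n + 1) []).length > 3 then
              acc ++ [[PySem.List.pyGetD (PySem.List.pyGetD ws (n + 1) []) 0 ' ', '.']]
            else
              acc ++ [PySem.List.pyGetD ws (n + 1) []]
          else
            acc ++ [PySem.List.pyGetD ws (n + 1) []])
        [PySem.List.pyGetD ws 0 []]
    = [PySem.List.pyGetD ws 0 []] ++
        (PySem.List.pyRange 0 ((ws.length : Int) - 1) 1).map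
          (fun n => if n < (ws.length : Int) - 2 then pvAbbr (PySem.List.pyGetD ws (n + 1) []) else PySem.List.pyGetD ws (n + 1) []) := by
  rw [show (fun (acc : List (List Char)) (n : Int) =>
          if n < (ws.length : Int) - 2 then
            if (PySem.List.pyGetD ws (n + 1) []).length > 3 then
              acc ++ [[PySem.List.pyGetD (PySem.List.pyGetD ws (n + 1) []) 0 ' ', '.']]
            else
              acc ++ [PySem.List.pyGetD ws (n + 1) []]
          else
            acc ++ [PySem.List.pyGetD ws (n + 1) []])
      = (fun acc n => acc ++ [if n < (ws.length : Int) - 2 then pvAbbr (PySem.List.pyGetD ws (n + 1) []) else PySem.List.pyGetD ws (n + 1) []]) by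
    funext acc n
    simp only [pvAbbr]
    split_ifs <;> rfl]
  exact PySem.List.foldl_append_singleton_eq_map _ _ _

-- the middle/last decomposition of the index-checked map
lemma range_map_mid (u : List (List Char)) (h : u ≠ []) :
    (List.range u.length).map
        (fun k => if k + 1 < u.length then pvAbbr (u.getD k []) else u.getD k []) =
      u.dropLast.map pvAbbr ++ [u.getLast h] := by
  induction u with
  | nil => exact absurd rfl h
  | cons x t ih =>
    cases t with
    | nil => simp
    | cons y t' =>
      rw [List.length_cons, List.range_succ_eq_map]
      simp only [List.map_cons, List.map_map]
      rw [List.getLast_cons (by simp), List.dropLast_cons_of_ne_nil (by simp), List.map_cons]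
      rw [if_pos (by simp)]
      simp only [List.getD_cons_zero]
      have hstep : ∀ k ∈ List.range (y :: t').length,
          ((fun k => if k + 1 < (y :: t').length + 1 then pvAbbr ((x :: y :: t').getD k []) else (x :: y :: t').getD k []) ∘ Nat.succ) k
          = (fun k => if k + 1 < (y :: t').length then pvAbbr ((y :: t').getD k []) else (y :: t').getD k []) k := by
        intro k _
        simp only [Function.comp_apply, Nat.succ_eq_add_one, List.getD_cons_succ]
        congr 1
        simp only [eq_iff_iff]; omega
      rw [List.map_congr_left hstep, ih (by simp)]
      simp

-- join on a cons, written as a flatten of space-prefixed pieces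
lemma join_cons_eq_flatten (x : List Char) (l : List (List Char)) :
    PySem.Chars.join [' '] (x :: l) = x ++ (l.map (fun y => ' ' :: y)).flatten := by
  induction l generalizing x with
  | nil => simp [PySem.Chars.join_singleton]
  | cons y t ih =>
    rw [PySem.Chars.join_cons_cons, ih y]
    simp

-- B's scan over a space-free chunk just extends the word buffer
lemma scan_word (m : List Char) (h : ' ' ∉ m) (o : Option (List Char)) (w : List Char) :
    m.foldl pvStep (o, w) = (o, w ++ m) := by
  induction m generalizing w with
  | nil => simp
  | cons c t ih =>
    have hc : c ≠ ' ' := fun hh => h (by simp [hh])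
    rw [List.foldl_cons]
    rw [show pvStep (o, w) c = (o, w ++ [c]) by simp [pvStep, hc]]
    rw [ih (fun hm => h (by simp [hm])) (w ++ [c])]
    simp

-- B's scan over a joined nonempty list of space-free words, output already open
lemma scan_join (ms : List (List Char)) (m o : List Char)
    (h : ∀ x ∈ m :: ms, ' ' ∉ x) :
    (PySem.Chars.join [' '] (m :: ms)).foldl pvStep (some o, []) =
      (some (o ++ (((m :: ms).dropLast).map (fun x => ' ' :: pvAbbr x)).flatten),
       (m :: ms).getLast (by simp)) := by
  induction ms generalizing m o with
  | nil =>
    rw [PySem.Chars.join_singleton, scan_word m (h m (by simp))]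
    simp
  | cons m2 t ih =>
    rw [PySem.Chars.join_cons_cons, List.foldl_append, List.foldl_append,
      scan_word m (h m (by simp)) (some o) []]
    rw [show List.foldl pvStep (some o, [] ++ m) [' '] = (some (o ++ ' ' :: pvAbbr m), []) from by
      simp [pvStep]]
    rw [ih m2 (o ++ ' ' :: pvAbbr m) (fun x hx => h x (by simp at hx ⊢; tauto))]
    simp [List.dropLast_cons_of_ne_nil, List.getLast_cons]

-- ===== VERDICT (by name: the statement is the Claim_ definition above) =====
theorem shortname_reports_spec : Claim_equal_shortname_reports := by
  intro item max_len _
  unfold Spec_shortname_reports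
  unfold shortname_reports shortname_reports_alt
  by_cases hc : PySem.Str.len item > max_len ∧ PySem.Str.len item > 2
  · rw [if_pos hc, if_neg (not_not_intro hc)]
    have hjoin := join_splitOn item.toList [' '] (by simp)
    have hfree := splitOn_sep_free item.toList ' '
    rcases hws : PySem.Chars.splitOn item.toList [' '] with _ | ⟨w0, t⟩
    · exact absurd hws (splitOn_ne_nil _ _)
    · rw [hws] at hjoin hfree
      cases t with
      | nil =>
        have hitem : item.toList = w0 := by
          rw [← hjoin, PySem.Chars.join_singleton]
        have hB : item.toList.foldl pvStep (none, []) = (none, [] ++ w0) := by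
          rw [hitem]; exact scan_word w0 (hfree w0 (by simp)) none []
        rw [hB]
        simp only []
        norm_num [PySem.List.pyRange_zero, PySem.List.pyGetD_zero_cons,
          PySem.Chars.join_singleton, hitem]
        rw [← hitem, String.ofList_toList]
      | cons w1 t' =>
        have hB : item.toList.foldl pvStep (none, []) =
            (some (w0 ++ ((List.map (fun x => ' ' :: pvAbbr x) (w1 :: t').dropLast)).flatten),
             (w1 :: t').getLast (by simp)) := by
          conv_lhs => rw [← hjoin]
          rw [PySem.Chars.join_cons_cons, List.foldl_append, List.foldl_append,
            scan_word w0 (hfree w0 (by simp)) none []]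
          rw [show List.foldl pvStep (none, [] ++ w0) [' '] = (some w0, []) from by
            simp [pvStep]]
          exact scan_join t' w1 w0 (fun x hx => hfree x (by simp at hx ⊢; tauto))
        rw [hB]
        simp only []
        rw [foldA (w0 :: w1 :: t')]
        have hlen : (((w0 :: w1 :: t').length : Int) - 1) = ((w1 :: t').length : Int) := by
          simp
        rw [hlen, PySem.List.pyRange_zero, List.map_map]
        have hmap : ∀ k ∈ List.range ((w1 :: t').length : Int).toNat,
            ((fun n => if n < ((w0 :: w1 :: t').length : Int) - 2 then pvAbbr (PySem.List.pyGetD (w0 :: w1 :: t') (n + 1) []) else PySem.List.pyGetD (w0 :: w1 :: t') (n + 1) []) ∘ (fun k : Nat => (k : Int))) k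
            = (fun k => if k + 1 < (w1 :: t').length then pvAbbr ((w1 :: t').getD k []) else (w1 :: t').getD k []) k := by
          intro k _
          simp only [Function.comp_apply]
          have h1 : ((k : Int) + 1) = ((k + 1 : Nat) : Int) := by push_cast; ring
          rw [h1, PySem.List.pyGetD_natCast]
          have h2 : (w0 :: w1 :: t').getD (k+1) [] = (w1 :: t').getD k [] := List.getD_cons_succ ..
          rw [h2]
          congr 1
          simp only [eq_iff_iff, List.length_cons]
          push_cast
          omega
        have htn : (((w1 :: t').length : Int)).toNat = (w1 :: t').length := by simp
        rw [htn] at hmap ⊢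
        rw [List.map_congr_left hmap, range_map_mid (w1 :: t') (by simp)]
        rw [PySem.List.pyGetD_zero_cons, List.singleton_append,
          join_cons_eq_flatten]
        simp [Function.comp_def]
  · rw [if_neg hc, if_pos hc]
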